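-- pv_equiv track=rewrite | github.com/ftomb/intonation_model_training | scripts/04_augment_data.py | sort_titles
-- ===== SOURCE A (Python) =====
-- import string
--
-- def sort_titles(train_titles):
--
-- 	book_titles = {}
-- 	for title in train_titles:
-- 		book_title = ''.join(['0' if char in string.digits else char for char in title])
-- 		book_title = book_title.split('0')
-- 		if book_title[0] not in book_titles.keys():
-- 			book_titles[book_title[0]] = [title]
-- 		else:
-- 			book_titles[book_title[0]].append(title)
--
-- 	return book_titles
-- ===== SOURCE B (Python) =====
-- import string
--
-- def sort_titles(train_titles):
--     # Group titles by the prefix before the first digit: compute each key once,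
--     # dedup the keys in first-occurrence order, then collect each group with one
--     # filtering pass per key (instead of A's incremental dict maintenance).
--     def prefix(title):
--         for i, ch in enumerate(title):
--             if ch in string.digits:
--                 return title[:i]
--         return title
--
--     pairs = [(prefix(t), t) for t in train_titles]
--     ordered_keys = dict.fromkeys(k for k, _ in pairs)
--     return {k: [t for k2, t in pairs if k2 == k] for k in ordered_keys}
-- ===== Notes on version B (the rewrite author's own statement) =====
-- stated objective: alternative
-- what changed: Replaces A's single incremental dict-building pass (insert-or-append per title, key via digit-replace/join/split) with a two-phase plan: compute each key once by scanning for the first digit, dedup keys in first-occurrence order, then build each group by one filtering pass per distinct key.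
import Mathlib
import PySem

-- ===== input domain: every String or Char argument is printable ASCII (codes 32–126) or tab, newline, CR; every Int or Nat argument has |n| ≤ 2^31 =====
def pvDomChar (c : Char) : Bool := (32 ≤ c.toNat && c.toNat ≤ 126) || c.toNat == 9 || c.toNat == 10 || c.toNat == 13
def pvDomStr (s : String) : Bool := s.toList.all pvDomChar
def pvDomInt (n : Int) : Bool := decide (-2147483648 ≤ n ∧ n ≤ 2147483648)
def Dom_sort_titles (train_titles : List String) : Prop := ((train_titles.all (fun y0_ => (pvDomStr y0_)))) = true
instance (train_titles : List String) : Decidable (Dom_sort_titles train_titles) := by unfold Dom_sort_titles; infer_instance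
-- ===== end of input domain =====

-- B groups by computing each title's pre-first-digit key once, deduping the keys in
-- first-occurrence order and collecting each group with one filter pass per key,
-- instead of A's incremental dict insert-or-append pass (objective: alternative).

-- ===== PORT A =====
-- book_title = ''.join(['0' if char in string.digits else char for char in title]); book_title.split('0')[0]
-- (split('0') has a non-empty separator, so it never raises and always yields at least one piece;
--  the '_' match arm is unreachable)
def sortTitlesKeyA (title : String) : String :=
  match PySem.Str.split? (PySem.Str.join ""
      (title.toList.map (fun ch => if ch ∈ ("0123456789").toList then "0" else String.ofList [ch]))) "0" with
  | some (p :: _) => p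
  | _ => ""

def sort_titles (train_titles : List String) : List (String × List String) :=
  (train_titles.foldl
    (fun book_titles title =>
      -- if book_title[0] not in book_titles.keys(): … = [title]  else: ….append(title)
      if book_titles.contains (sortTitlesKeyA title) = false then
        book_titles.insert (sortTitlesKeyA title) [title]
      else
        book_titles.modify (sortTitlesKeyA title) [] (fun v => v ++ [title]))
    PySem.Dict.empty).items

-- ===== PORT B =====
-- Source B's prefix(): scan for the first char in string.digits and return title[:i]
-- (= take while the char is not a digit), whole title if none.
def sortTitlesPrefixB (title : String) : String :=
  String.ofList (title.toList.takeWhile (fun ch => !decide (ch ∈ ("0123456789").toList)))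

def sort_titles_alt (train_titles : List String) : List (String × List String) :=
  let pairs := train_titles.map (fun t => (sortTitlesPrefixB t, t))
  let ordered_keys := PySem.List.dedup (pairs.map (fun p => p.1))
  ordered_keys.map (fun k => (k, (pairs.filter (fun p => p.1 == k)).map (fun p => p.2)))

-- ===== PRECONDITION & SPEC =====
def Spec_sort_titles (train_titles : List String) (out : List (String × List String)) : Prop := out = sort_titles_alt train_titles
instance (train_titles : List String) (out : List (String × List String)) : Decidable (Spec_sort_titles train_titles out) := by unfold Spec_sort_titles; infer_instance

-- ===== CLAIM (what is proved, stated in full; the proofs are below) =====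
def Claim_equal_sort_titles : Prop := ∀ (train_titles : List String), Dom_sort_titles train_titles → Spec_sort_titles train_titles (sort_titles train_titles)

-- ===== LEMMAS AND PROOFS =====

-- proof-only abbreviations for the digit test and A's digit-to-'0' replacement
def pvDig (c : Char) : Bool := decide (c ∈ ("0123456789").toList)
def pvRep (c : Char) : Char := if pvDig c then '0' else c

-- head of PySem.Chars.splitOn.go once the accumulator is non-empty: its last element
theorem pv_go_head_acc (c : Char) : ∀ (fuel : Nat) (l cur : List Char) (as : List (List Char)) (a : List Char),
    (PySem.Chars.splitOn.go [c] fuel l cur (as ++ [a])).head? = some a := by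
  intro fuel
  induction fuel with
  | zero => intro l cur as a; simp [PySem.Chars.splitOn.go]
  | succ f ih =>
    intro l cur as a
    cases l with
    | nil => simp [PySem.Chars.splitOn.go]
    | cons x rest =>
      simp only [PySem.Chars.splitOn.go]
      split
      · have h : cur.reverse :: (as ++ [a]) = (cur.reverse :: as) ++ [a] := by simp
        rw [h, ih]
      · exact ih rest (x :: cur) as a

-- head of splitOn.go from an empty accumulator: the pre-separator prefix
theorem pv_go_head (c : Char) : ∀ (fuel : Nat) (l cur : List Char), l.length < fuel →
    (PySem.Chars.splitOn.go [c] fuel l cur []).head? = some (cur.reverse ++ l.takeWhile (· ≠ c)) := by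
  intro fuel
  induction fuel with
  | zero => intro l cur h; omega
  | succ f ih =>
    intro l cur h
    cases l with
    | nil => simp [PySem.Chars.splitOn.go]
    | cons x rest =>
      simp only [PySem.Chars.splitOn.go]
      split
      · rename_i hpre
        have hx : x = c := by
          simp [List.isPrefixOf] at hpre
          exact hpre.symm
        rw [show (cur.reverse :: ([] : List (List Char))) = [] ++ [cur.reverse] from rfl,
            pv_go_head_acc]
        simp [hx]
      · rename_i hpre
        have hx : x ≠ c := by
          simp [List.isPrefixOf] at hpre
          intro hc; exact hpre hc.symm
        rw [ih rest (x :: cur) (by simpa using Nat.lt_of_succ_lt_succ h)]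
        simp [hx]

theorem pv_splitOn_head (c : Char) (s : List Char) :
    (PySem.Chars.splitOn s [c]).head? = some (s.takeWhile (· ≠ c)) := by
  unfold PySem.Chars.splitOn
  exact pv_go_head c (s.length + 1) s [] (by omega)

theorem pv_takeWhile_congr {α : Type} (p q : α → Bool) (l : List α)
    (h : ∀ x ∈ l, p x = q x) : l.takeWhile p = l.takeWhile q := by
  induction l with
  | nil => rfl
  | cons x xs ih =>
    have hx := h x (by simp)
    simp only [List.takeWhile_cons, hx]
    split
    · rw [ih (fun y hy => h y (by simp [hy]))]
    · rfl

-- A's join-replace-split key equals B's take-until-first-digit prefix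
theorem pv_key_eq (t : String) : sortTitlesKeyA t = sortTitlesPrefixB t := by
  unfold sortTitlesKeyA sortTitlesPrefixB
  have hjoin : (PySem.Str.join ""
      (t.toList.map (fun ch => if ch ∈ ("0123456789").toList then "0" else String.ofList [ch]))).toList
      = t.toList.map pvRep := by
    rw [PySem.Str.toList_join]
    have hmm : (t.toList.map (fun ch => if ch ∈ ("0123456789").toList then "0" else String.ofList [ch])).map String.toList
        = (t.toList.map pvRep).map (fun c => [c]) := by
      simp only [List.map_map]
      refine List.map_congr_left (fun c _ => ?_)
      by_cases hc : c ∈ ("0123456789").toList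
      · have hdc : pvDig c = true := decide_eq_true hc
        simp only [Function.comp, if_pos hc, pvRep, hdc, if_true]
        decide
      · have hdc : pvDig c = false := decide_eq_false hc
        simp only [Function.comp, if_neg hc, pvRep, hdc, Bool.false_eq_true, if_false,
          String.toList_ofList]
    rw [hmm]
    exact PySem.Chars.join_nil_singletons _
  have hw : ((t.toList.map pvRep).takeWhile (· ≠ '0')) = t.toList.takeWhile (fun c => !pvDig c) := by
    rw [List.takeWhile_map]
    have hcong : t.toList.takeWhile ((fun c => decide (c ≠ '0')) ∘ pvRep)
        = t.toList.takeWhile (fun c => !pvDig c) := by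
      refine pv_takeWhile_congr _ _ _ (fun c _ => ?_)
      by_cases hc : pvDig c = true
      · simp [Function.comp, pvRep, hc]
      · have hc0 : c ≠ '0' := by
          intro he; apply hc; rw [he]; decide
        simp [Function.comp, pvRep, hc, hc0]
    rw [hcong]
    have hid : List.map pvRep (t.toList.takeWhile (fun c => !pvDig c))
        = List.map id (t.toList.takeWhile (fun c => !pvDig c)) := by
      refine List.map_congr_left (fun c hc => ?_)
      have hp := List.mem_takeWhile_imp hc
      simp only [Bool.not_eq_true'] at hp
      simp [pvRep, hp]
    rw [hid, List.map_id]
  have hsplit : PySem.Str.split? (PySem.Str.join ""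
      (t.toList.map (fun ch => if ch ∈ ("0123456789").toList then "0" else String.ofList [ch]))) "0"
      = some ((PySem.Chars.splitOn (t.toList.map pvRep) ['0']).map String.ofList) := by
    unfold PySem.Str.split? PySem.Chars.split?
    rw [hjoin]
    simp
  obtain ⟨rest, hrest⟩ := List.head?_eq_some_iff.mp (pv_splitOn_head '0' (t.toList.map pvRep))
  rw [hsplit, hrest]
  simp only [List.map_cons]
  rw [hw]
  rfl

-- the dict-building fold, over precomputed (key, title) pairs, read out as items
theorem pv_build_items (l : List (String × String)) :
    (List.foldl (fun (d : PySem.Dict String (List String)) (p : String × String) =>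
        d.modify p.1 [] (fun v => v ++ [p.2])) PySem.Dict.empty l).items
    = (PySem.Set.ofList (l.map (fun p => p.1))).map
        (fun k => (k, (l.filter (fun p => p.1 == k)).map (fun p => p.2))) := by
  have hnd : (List.foldl (fun (d : PySem.Dict String (List String)) (p : String × String) =>
      d.modify p.1 [] (fun v => v ++ [p.2])) PySem.Dict.empty l).keys.Nodup :=
    PySem.Dict.nodup_keys_foldl_modify_key l Prod.fst [] (fun _ p => fun v => v ++ [p.2])
      PySem.Dict.empty PySem.Dict.nodup_keys_empty
  rw [PySem.Dict.items_eq_map_keys _ hnd []]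
  rw [PySem.Dict.keys_foldl_modify_key l Prod.fst [] (fun _ p => fun v => v ++ [p.2]) PySem.Dict.empty]
  refine List.map_congr_left (fun k _ => ?_)
  rw [PySem.Dict.getD_foldl_modify_append l PySem.Dict.empty k]
  simp [PySem.Dict.getD_empty]

theorem pv_main (train_titles : List String) : sort_titles train_titles = sort_titles_alt train_titles := by
  unfold sort_titles sort_titles_alt
  have hstep : (fun (d : PySem.Dict String (List String)) (title : String) =>
      if d.contains (sortTitlesKeyA title) = false then d.insert (sortTitlesKeyA title) [title]
      else d.modify (sortTitlesKeyA title) [] (fun v => v ++ [title]))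
      = fun (d : PySem.Dict String (List String)) (title : String) =>
        d.modify (sortTitlesPrefixB title) [] (fun v => v ++ [title]) := by
    funext d title
    rw [pv_key_eq]
    by_cases hc : d.contains (sortTitlesPrefixB title) = false
    · rw [if_pos hc]
      unfold PySem.Dict.modify
      rw [PySem.Dict.getD_of_not_contains d [] hc]
      rfl

    · rw [if_neg hc]
  rw [hstep]
  rw [show (List.foldl (fun (d : PySem.Dict String (List String)) (title : String) =>
        d.modify (sortTitlesPrefixB title) [] (fun v => v ++ [title])) PySem.Dict.empty train_titles)
      = List.foldl (fun (d : PySem.Dict String (List String)) (p : String × String) =>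
        d.modify p.1 [] (fun v => v ++ [p.2])) PySem.Dict.empty
        (train_titles.map (fun t => (sortTitlesPrefixB t, t))) from (List.foldl_map (f := fun t : String => (sortTitlesPrefixB t, t))
        (g := fun (d : PySem.Dict String (List String)) (p : String × String) =>
          d.modify p.1 [] (fun v => v ++ [p.2]))
        (l := train_titles) (init := PySem.Dict.empty)).symm]
  rw [pv_build_items]
  simp only [PySem.List.dedup_eq_ofList]

-- ===== VERDICT (by name: the statement is the Claim_ definition above) =====
theorem sort_titles_spec : Claim_equal_sort_titles := by
  intro train_titles _
  unfold Spec_sort_titles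
  exact pv_main train_titles
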